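-- pv_equiv track=rewrite | github.com/ashwinsrivastav/python_learning | cunstructing rect.py | rec
-- ===== SOURCE A (Python) =====
-- import math
--
-- def rec(area):
--     a=int(math.sqrt(area));w=a
--     for l in range(a,area):
--         for w in range(a,1,-1):
--             if l*w==area:
--                 return [l,w]
--             elif l*w<area:
--                 break
--     else:
--         return [area,1]
-- ===== SOURCE B (Python) =====
-- import math
--
-- def rec(area):
--     for w in range(math.isqrt(area), 1, -1):
--         if area % w == 0:
--             return [area // w, w]
--     return [area, 1]
-- ===== Notes on version B (the rewrite author's own statement) =====
-- stated objective: faster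
-- what changed: Replaces the nested scan over candidate lengths (which for prime areas walks all the way to the area itself) with a single descending scan over candidate widths starting at isqrt(area), returning the cofactor pair at the first divisor found.
import Mathlib
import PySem

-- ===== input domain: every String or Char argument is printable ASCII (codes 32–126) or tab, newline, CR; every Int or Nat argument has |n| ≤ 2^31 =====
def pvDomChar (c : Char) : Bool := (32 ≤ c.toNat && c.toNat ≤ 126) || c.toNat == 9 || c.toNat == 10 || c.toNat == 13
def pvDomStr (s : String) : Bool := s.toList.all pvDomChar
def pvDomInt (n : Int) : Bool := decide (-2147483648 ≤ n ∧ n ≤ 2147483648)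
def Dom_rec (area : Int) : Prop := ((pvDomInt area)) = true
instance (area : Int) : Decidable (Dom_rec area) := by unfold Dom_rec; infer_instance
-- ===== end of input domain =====

-- B replaces A's nested l/w scans by a single descending divisor scan from isqrt(area): asymptotically faster.
-- On the stated domain (0 ≤ area ≤ 2^31) Python's int(math.sqrt(area)) = math.isqrt(area) = Int.sqrt area exactly.

-- ===== PORT A =====
-- inner 'for w in range(a,1,-1)' with return / break, as a recursion on w
def recInner (area l w : Int) : Option (List Int) :=
  if w ≤ 1 then none
  else if l * w = area then some [l, w]
  else if l * w < area then none
  else recInner area l (w - 1)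
termination_by (w - 1).toNat
decreasing_by omega

-- outer 'for l in range(a, area)' as a recursion on l; the for-else returns [area, 1]
def recOuter (area a l : Int) : Option (List Int) :=
  if area ≤ l then none
  else match recInner area l a with
    | some r => some r
    | none => recOuter area a (l + 1)
termination_by (area - l).toNat
decreasing_by omega

def rec (area : Int) : List Int :=
  let a := Int.sqrt area
  (recOuter area a a).getD [area, 1]

-- ===== PORT B =====
-- 'for w in range(isqrt(area), 1, -1)' as a recursion on w
def altLoop (area w : Int) : Option (List Int) :=
  if w ≤ 1 then none
  else if PySem.Int.mod area w = 0 then some [PySem.Int.floordiv area w, w]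
  else altLoop area (w - 1)
termination_by (w - 1).toNat
decreasing_by omega

def rec_alt (area : Int) : List Int :=
  (altLoop area (Int.sqrt area)).getD [area, 1]

-- ===== PRECONDITION & SPEC =====
-- Pre_ excludes negative area, on which A raises ValueError (math.sqrt of a negative number)
def Pre_rec (area : Int) : Prop := 0 ≤ area
instance (area : Int) : Decidable (Pre_rec area) := by unfold Pre_rec; infer_instance
def pvWitness_rec : Int := (12)

def Spec_rec (area : Int) (out : List Int) : Prop := out = rec_alt area
instance (area : Int) (out : List Int) : Decidable (Spec_rec area out) := by unfold Spec_rec; infer_instance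

-- ===== CLAIM (what is proved, stated in full; the proofs are below) =====
def Claim_equal_rec : Prop := ∀ (area : Int), Dom_rec area → Pre_rec area → Spec_rec area (rec area)

-- ===== LEMMAS AND PROOFS =====

-- A's inner loop finds w = area/l iff l divides area with a quotient in [2, w]
theorem inner_char (area l : Int) (hl : 1 ≤ l) (ha : 2 ≤ area) (w : Int) :
    recInner area l w =
      (if l ∣ area ∧ area ≤ l * w ∧ 2 * l ≤ area then some [l, area / l] else none) := by
  induction w using recInner.induct area l with
  | case1 w h =>
    rw [recInner]
    simp only [h, if_true]
    rw [if_neg]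
    rintro ⟨⟨k, hk⟩, h1, h2⟩
    nlinarith
  | case2 w h heq =>
    have hcond : l ∣ area ∧ area ≤ l * w ∧ 2 * l ≤ area :=
      ⟨⟨w, heq.symm⟩, heq.ge, by nlinarith⟩
    have hq : area / l = w := by rw [← heq, Int.mul_ediv_cancel_left _ (by omega : l ≠ 0)]
    rw [recInner]
    simp only [h, if_false]
    rw [if_pos heq, if_pos hcond, hq]
  | case3 w h heq hlt =>
    rw [recInner]
    simp only [h, if_false, heq, hlt, if_true]
    rw [if_neg]
    rintro ⟨_, h1, _⟩
    omega
  | case4 w h heq hlt ih =>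
    rw [recInner]
    simp only [h, if_false, heq, hlt]
    rw [ih]
    have hgt : area < l * w := lt_of_le_of_ne (not_lt.mp hlt) (Ne.symm heq)
    by_cases hd : l ∣ area
    · obtain ⟨k, hk⟩ := hd
      have hkw : k ≤ w - 1 := by nlinarith
      have h1 : area ≤ l * (w - 1) := by nlinarith
      simp [h1, Dvd.intro k hk.symm, (by nlinarith : area ≤ l * w)]
    · simp [hd]

-- B's loop: none when no divisor in [2, w]
theorem alt_none (area : Int) (w : Int) :
    (∀ d, 2 ≤ d → d ≤ w → ¬ d ∣ area) → altLoop area w = none := by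
  induction w using altLoop.induct area with
  | case1 w h => intro _; rw [altLoop]; simp [h]
  | case2 w h hmod =>
    intro hnd
    exact absurd ((PySem.Int.mod_eq_zero_iff_dvd area w).mp hmod) (hnd w (by omega) le_rfl)
  | case3 w h hmod ih =>
    intro hnd
    rw [altLoop]
    simp only [h, if_false, hmod]
    exact ih (fun d h2 hw => hnd d h2 (by omega))

-- B's loop: returns the greatest divisor d in [2, w] and the cofactor
theorem alt_some (area d : Int) (hd2 : 2 ≤ d) (hdd : d ∣ area) (w : Int) :
    d ≤ w → (∀ d', d < d' → d' ≤ w → ¬ d' ∣ area) →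
    altLoop area w = some [PySem.Int.floordiv area d, d] := by
  induction w using altLoop.induct area with
  | case1 w h => intro hdw _; omega
  | case2 w h hmod =>
    intro hdw hmax
    have hwd : w ∣ area := (PySem.Int.mod_eq_zero_iff_dvd area w).mp hmod
    have hwd' : w = d := by
      by_contra hne
      exact hmax w (by omega) le_rfl hwd
    subst hwd'
    rw [altLoop]
    simp [h, hmod]
  | case3 w h hmod ih =>
    intro hdw hmax
    have hwnd : ¬ w ∣ area := fun hc => hmod ((PySem.Int.mod_eq_zero_iff_dvd area w).mpr hc)
    have hne : d ≠ w := fun hc => hwnd (hc ▸ hdd)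
    rw [altLoop]
    simp only [h, if_false, hmod]
    exact ih (by omega) (fun d' h1 h2 => hmax d' h1 (by omega))

-- from A's inner-loop success condition at l, area/l is a divisor in [2, a]
theorem cofactor_bounds (area a l : Int) (hl : 1 ≤ l) (hd : l ∣ area)
    (h1 : area ≤ l * a) (h2 : 2 * l ≤ area) :
    (area / l) ∣ area ∧ 2 ≤ area / l ∧ area / l ≤ a ∧ l * (area / l) = area := by
  have hlw : l * (area / l) = area := Int.mul_ediv_cancel' hd
  refine ⟨⟨l, by rw [mul_comm]; exact hlw.symm⟩, ?_, ?_, hlw⟩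
  · nlinarith
  · nlinarith

-- A's outer loop: none when no divisor in [2, a]
theorem outer_none (area a : Int) (ha2 : 2 ≤ area) (ha1 : 1 ≤ a)
    (hnd : ∀ d, 2 ≤ d → d ≤ a → ¬ d ∣ area) (l : Int) :
    a ≤ l → recOuter area a l = none := by
  induction l using recOuter.induct area a with
  | case1 l h => intro _; rw [recOuter]; simp [h]
  | case2 l h r hr =>
    intro hal
    exfalso
    rw [inner_char area l (by omega) ha2 a] at hr
    by_cases hc : l ∣ area ∧ area ≤ l * a ∧ 2 * l ≤ area
    · obtain ⟨hwd, hw2, hwa, _⟩ := cofactor_bounds area a l (by omega) hc.1 hc.2.1 hc.2.2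
      exact hnd _ hw2 hwa hwd
    · rw [if_neg hc] at hr; simp at hr
  | case3 l h hr ih =>
    intro hal
    rw [recOuter]
    simp only [h, if_false, hr]
    exact ih (by omega)

-- A's outer loop starting at l ≤ area/d reaches l = area/d first, d the greatest divisor in [2, a]
theorem outer_some (area a d : Int) (ha2 : 2 ≤ area) (ha1 : 1 ≤ a) (hd2 : 2 ≤ d)
    (hda : d ≤ a) (hdd : d ∣ area)
    (hmax : ∀ d', 2 ≤ d' → d' ≤ a → d' ∣ area → d' ≤ d) (l : Int) :
    a ≤ l → l ≤ area / d → recOuter area a l = some [area / d, d] := by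
  have hDL : d * (area / d) = area := Int.mul_ediv_cancel' hdd
  induction l using recOuter.induct area a with
  | case1 l h =>
    intro hal hlL
    exfalso; nlinarith
  | case2 l h r hr =>
    intro hal hlL
    rw [inner_char area l (by omega) ha2 a] at hr
    rcases eq_or_lt_of_le hlL with heq | hlt
    · have hcond : l ∣ area ∧ area ≤ l * a ∧ 2 * l ≤ area := by
        subst heq
        refine ⟨⟨d, by rw [mul_comm]; exact hDL.symm⟩, by nlinarith, by nlinarith⟩
      have hql : area / l = d := by
        subst heq
        exact Int.ediv_eq_of_eq_mul_left (by nlinarith) hDL.symm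
      rw [recOuter]
      simp only [h, if_false]
      rw [inner_char area l (by omega) ha2 a, if_pos hcond, hql, heq]
    · have hcond : ¬ (l ∣ area ∧ area ≤ l * a ∧ 2 * l ≤ area) := by
        rintro ⟨hld, h1, h2⟩
        obtain ⟨hwd, hw2, hwa, hlw⟩ := cofactor_bounds area a l (by omega) hld h1 h2
        have hwle : area / l ≤ d := hmax _ hw2 hwa hwd
        nlinarith
      rw [if_neg hcond] at hr
      simp at hr
  | case3 l h hr ih =>
    intro hal hlL
    have hlt : l < area / d := by
      rcases eq_or_lt_of_le hlL with heq | hlt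
      · exfalso
        rw [inner_char area l (by omega) ha2 a] at hr
        have hcond : l ∣ area ∧ area ≤ l * a ∧ 2 * l ≤ area := by
          subst heq
          refine ⟨⟨d, by rw [mul_comm]; exact hDL.symm⟩, by nlinarith, by nlinarith⟩
        rw [if_pos hcond] at hr
        simp at hr
      · exact hlt
    rw [recOuter]
    simp only [h, if_false, hr]
    exact ih (by omega) (by omega)

-- ===== VERDICT (by name: the statement is the Claim_ definition above) =====
theorem rec_spec : Claim_equal_rec := by
  intro area _ hpre
  unfold Spec_rec
  unfold Pre_rec at hpre
  by_cases hsmall : area ≤ 1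
  · interval_cases area
    · have h1 : recOuter 0 0 0 = none := by rw [recOuter]; norm_num
      have h2 : altLoop 0 0 = none := by rw [altLoop]; norm_num
      simp [rec, rec_alt, Int.sqrt, h1, h2]
    · have h1 : recOuter 1 1 1 = none := by rw [recOuter]; norm_num
      have h2 : altLoop 1 1 = none := by rw [altLoop]; norm_num
      simp [rec, rec_alt, Int.sqrt, h1, h2]
  · have ha2 : 2 ≤ area := by omega
    set a := Int.sqrt area with hA
    have hsq : a * a ≤ area := by
      have := (Int.abs_le_sqrt (a := Int.sqrt area) hpre).mp
        (by rw [abs_of_nonneg (Int.sqrt_nonneg area)])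
      exact this
    have hub : area < (a + 1) * (a + 1) := by
      by_contra hcon
      push Not at hcon
      have h1 : |a + 1| ≤ Int.sqrt area := (Int.abs_le_sqrt hpre).mpr hcon
      have h2 : a + 1 ≤ |a + 1| := le_abs_self _
      omega
    have ha0 : 0 ≤ a := Int.sqrt_nonneg area
    have ha1 : 1 ≤ a := by nlinarith
    by_cases hex : ∃ d : Int, (2 ≤ d ∧ d ≤ a ∧ d ∣ area)
    · obtain ⟨d, ⟨hd2, hda, hdd⟩, hmax⟩ :=
        Int.exists_greatest_of_bdd (P := fun d => 2 ≤ d ∧ d ≤ a ∧ d ∣ area)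
          ⟨a, fun z hz => hz.2.1⟩ hex
      have hmax' : ∀ d', 2 ≤ d' → d' ≤ a → d' ∣ area → d' ≤ d :=
        fun d' h1 h2 h3 => hmax d' ⟨h1, h2, h3⟩
      have hDL : d * (area / d) = area := Int.mul_ediv_cancel' hdd
      have hL : a ≤ area / d := by nlinarith
      show (recOuter area a a).getD [area, 1] = (altLoop area a).getD [area, 1]
      rw [outer_some area a d ha2 ha1 hd2 hda hdd hmax' a le_rfl hL,
        alt_some area d hd2 hdd a hda
          (fun d' hlt hle hdvd => absurd (hmax' d' (by omega) hle hdvd) (by omega)),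
        PySem.Int.floordiv_eq_ediv_of_pos (by omega)]
    · push Not at hex
      show (recOuter area a a).getD [area, 1] = (altLoop area a).getD [area, 1]
      rw [outer_none area a ha2 ha1 hex a le_rfl, alt_none area a hex]
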